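-- pv_equiv track=rewrite | github.com/BWSI-RACECAR/code-clash-09-st3bie | licenseplate.py | licensePlate
-- ===== SOURCE A (Python) =====
-- def licensePlate(str):
--     characters = list(str)
--     alphabetBlur = 0
--     numBlur = 0
--
--     for i in range(3):
--         if (characters[i] == "."):
--             alphabetBlur += 1
--
--     for i in range(3, 7):
--         if (characters[i] == "."):
--             numBlur += 1
--
--     if (alphabetBlur + numBlur == 0):
--         return 0
--     output = 1
--     if (alphabetBlur != 0):
--         for i in range(0, alphabetBlur):
--             output *= (26 - (3 - alphabetBlur) - i)
--
--     if (numBlur != 0):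
--         for i in range(0, numBlur):
--             output *= (10 - (4 - numBlur) - i)
--
--     return output
-- ===== SOURCE B (Python) =====
-- # Table-lookup reimplementation: the two product loops of A only ever produce
-- # one of a handful of values (falling factorials P(23+ab, ab) and P(6+nb, nb)
-- # for ab in 0..3, nb in 0..4), so precompute them once.
-- _ALPHA = (1, 24, 600, 15600)      # 26*25*24 falling products, ab letters blurred
-- _NUM = (1, 7, 56, 504, 5040)      # 10*9*8*7 falling products, nb digits blurred
--
-- def licensePlate(str):
--     ab = (str[0], str[1], str[2]).count(".")
--     nb = (str[3], str[4], str[5], str[6]).count(".")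
--     return _ALPHA[ab] * _NUM[nb] if ab or nb else 0
-- ===== Notes on version B (the rewrite author's own statement) =====
-- stated objective: simpler
-- what changed: Replaces A's two counting loops and two conditional product loops with direct tuple counts and a lookup of the precomputed falling-factorial values in two constant tables.
import Mathlib
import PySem

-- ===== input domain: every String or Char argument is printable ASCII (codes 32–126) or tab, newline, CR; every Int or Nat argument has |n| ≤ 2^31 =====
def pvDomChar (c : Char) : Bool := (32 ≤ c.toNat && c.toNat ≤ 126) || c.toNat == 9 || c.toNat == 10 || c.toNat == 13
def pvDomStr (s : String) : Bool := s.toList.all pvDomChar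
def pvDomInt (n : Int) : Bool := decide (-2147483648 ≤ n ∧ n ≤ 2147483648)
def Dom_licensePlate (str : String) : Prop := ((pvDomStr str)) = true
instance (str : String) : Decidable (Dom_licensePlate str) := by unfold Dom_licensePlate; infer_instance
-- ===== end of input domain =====

-- B replaces A's counting loops and conditional product loops with direct counts and two constant lookup tables (same O(1) cost, plainer code).

-- ===== PORT A =====
def licensePlate (str : String) : Int :=
  let characters := str.toList
  let alphabetBlur : Int := (PySem.List.pyRange 0 3 1).foldl
    (fun acc i => if (PySem.List.pyGet? characters i).getD ' ' = '.' then acc + 1 else acc) 0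
  let numBlur : Int := (PySem.List.pyRange 3 7 1).foldl
    (fun acc i => if (PySem.List.pyGet? characters i).getD ' ' = '.' then acc + 1 else acc) 0
  if alphabetBlur + numBlur = 0 then 0
  else
    let output : Int := 1
    let output := if alphabetBlur ≠ 0 then
        (PySem.List.pyRange 0 alphabetBlur 1).foldl
          (fun o i => o * (26 - (3 - alphabetBlur) - i)) output
      else output
    let output := if numBlur ≠ 0 then
        (PySem.List.pyRange 0 numBlur 1).foldl
          (fun o i => o * (10 - (4 - numBlur) - i)) output
      else output
    output

-- ===== PORT B =====
def pvAlphaTable : List Int := [1, 24, 600, 15600]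
def pvNumTable : List Int := [1, 7, 56, 504, 5040]

def licensePlate_alt (str : String) : Int :=
  let cs := str.toList
  let g : Int → Char := fun i => (PySem.List.pyGet? cs i).getD ' '
  let ab : Int := PySem.List.count [g 0, g 1, g 2] '.'
  let nb : Int := PySem.List.count [g 3, g 4, g 5, g 6] '.'
  if ab ≠ 0 ∨ nb ≠ 0 then
    (PySem.List.pyGet? pvAlphaTable ab).getD 0 * (PySem.List.pyGet? pvNumTable nb).getD 0
  else 0

-- ===== PRECONDITION & SPEC =====
-- Pre_ excludes exactly the strings shorter than 7 characters, on which A raises IndexError (B raises there too).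
def Pre_licensePlate (str : String) : Prop := 7 ≤ str.toList.length
instance (str : String) : Decidable (Pre_licensePlate str) := by unfold Pre_licensePlate; infer_instance
def pvWitness_licensePlate : String := "AB.1.34"

def Spec_licensePlate (str : String) (out : Int) : Prop := out = licensePlate_alt str
instance (str : String) (out : Int) : Decidable (Spec_licensePlate str out) := by unfold Spec_licensePlate; infer_instance

-- ===== CLAIM (what is proved, stated in full; the proofs are below) =====
def Claim_equal_licensePlate : Prop := ∀ (str : String), Dom_licensePlate str → Pre_licensePlate str → Spec_licensePlate str (licensePlate str)

-- ===== LEMMAS AND PROOFS =====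
-- Both ports read only the first seven characters; fix them and case on which are '.'.
lemma licensePlate_core (c0 c1 c2 c3 c4 c5 c6 : Char) (t : List Char) (s : String)
    (hs : s.toList = c0 :: c1 :: c2 :: c3 :: c4 :: c5 :: c6 :: t) :
    licensePlate s = licensePlate_alt s := by
  have g0 : PySem.List.pyGet? (c0::c1::c2::c3::c4::c5::c6::t) (0:Int) = some c0 := by
    rw [show ((0:Int)) = ((0:Nat):Int) by norm_num, PySem.List.pyGet?_natCast]; rfl
  have g1 : PySem.List.pyGet? (c0::c1::c2::c3::c4::c5::c6::t) (1:Int) = some c1 := by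
    rw [show ((1:Int)) = ((1:Nat):Int) by norm_num, PySem.List.pyGet?_natCast]; rfl
  have g2 : PySem.List.pyGet? (c0::c1::c2::c3::c4::c5::c6::t) (2:Int) = some c2 := by
    rw [show ((2:Int)) = ((2:Nat):Int) by norm_num, PySem.List.pyGet?_natCast]; rfl
  have g3 : PySem.List.pyGet? (c0::c1::c2::c3::c4::c5::c6::t) (3:Int) = some c3 := by
    rw [show ((3:Int)) = ((3:Nat):Int) by norm_num, PySem.List.pyGet?_natCast]; rfl
  have g4 : PySem.List.pyGet? (c0::c1::c2::c3::c4::c5::c6::t) (4:Int) = some c4 := by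
    rw [show ((4:Int)) = ((4:Nat):Int) by norm_num, PySem.List.pyGet?_natCast]; rfl
  have g5 : PySem.List.pyGet? (c0::c1::c2::c3::c4::c5::c6::t) (5:Int) = some c5 := by
    rw [show ((5:Int)) = ((5:Nat):Int) by norm_num, PySem.List.pyGet?_natCast]; rfl
  have g6 : PySem.List.pyGet? (c0::c1::c2::c3::c4::c5::c6::t) (6:Int) = some c6 := by
    rw [show ((6:Int)) = ((6:Nat):Int) by norm_num, PySem.List.pyGet?_natCast]; rfl
  have hr3 : PySem.List.pyRange 0 3 1 = [0,1,2] := by decide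
  have hr7 : PySem.List.pyRange 3 7 1 = [3,4,5,6] := by decide
  simp only [licensePlate, licensePlate_alt, hs, hr3, hr7, List.foldl,
    g0, g1, g2, g3, g4, g5, g6, Option.getD_some]
  by_cases h0 : c0 = '.' <;> by_cases h1 : c1 = '.' <;> by_cases h2 : c2 = '.' <;>
    by_cases h3 : c3 = '.' <;> by_cases h4 : c4 = '.' <;> by_cases h5 : c5 = '.' <;>
    by_cases h6 : c6 = '.' <;>
    simp only [h0, h1, h2, h3, h4, h5, h6, PySem.List.count, List.count_cons, List.count_nil,
      beq_iff_eq, if_true, if_false] <;>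
    decide

-- ===== VERDICT (by name: the statement is the Claim_ definition above) =====
theorem licensePlate_spec : Claim_equal_licensePlate := by
  intro s _ hp
  unfold Pre_licensePlate at hp
  unfold Spec_licensePlate
  rcases hl : s.toList with _ | ⟨c0, _ | ⟨c1, _ | ⟨c2, _ | ⟨c3, _ | ⟨c4, _ | ⟨c5, _ | ⟨c6, t⟩⟩⟩⟩⟩⟩⟩ <;>
    rw [hl] at hp <;> simp at hp
  exact (licensePlate_core c0 c1 c2 c3 c4 c5 c6 t s hl)
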